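-- pv_equiv track=rewrite | github.com/stevestar888/leetcode-problems | binarysearch.io-problems/binarysearch.io-list_min_replacement.py | solve
-- ===== SOURCE A (Python) =====
-- def solve(nums):
--     prev_smallest = nums[0]
--
--     for i, num in enumerate(nums):
--         if i != 0:
--             value = nums[i]
--             nums[i] = prev_smallest
--             prev_smallest = min(value, prev_smallest)
--
--     nums[0] = 0
--     return nums
-- ===== SOURCE B (Python) =====
-- def solve(nums):
--     # Divide and conquer: scan(seg) recursively returns (prefix minima of seg including
--     # each position, min of seg); the two halves are merged by clamping the right half's
--     # prefix minima with the left half's minimum. Then shift right by one and zero the head.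
--     # Mutates nums in place like the original (slice assignment on the argument).
--     def scan(seg):
--         if len(seg) == 1:
--             return list(seg), seg[0]
--         mid = len(seg) // 2
--         lp, lm = scan(seg[:mid])
--         rp, rm = scan(seg[mid:])
--         return lp + [m if m < lm else lm for m in rp], (lm if lm < rm else rm)
--
--     pm, _ = scan(nums)
--     nums[1:] = pm[:-1]
--     nums[0] = 0
--     return nums
-- ===== Notes on version B (the rewrite author's own statement) =====
-- stated objective: alternative
-- what changed: Replaces A's single left-to-right loop with a running minimum by a divide-and-conquer scan: recursively compute each half's prefix-minimum table and minimum, merge by clamping the right table with the left minimum, then shift the table right by one and zero the head.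
import Mathlib
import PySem

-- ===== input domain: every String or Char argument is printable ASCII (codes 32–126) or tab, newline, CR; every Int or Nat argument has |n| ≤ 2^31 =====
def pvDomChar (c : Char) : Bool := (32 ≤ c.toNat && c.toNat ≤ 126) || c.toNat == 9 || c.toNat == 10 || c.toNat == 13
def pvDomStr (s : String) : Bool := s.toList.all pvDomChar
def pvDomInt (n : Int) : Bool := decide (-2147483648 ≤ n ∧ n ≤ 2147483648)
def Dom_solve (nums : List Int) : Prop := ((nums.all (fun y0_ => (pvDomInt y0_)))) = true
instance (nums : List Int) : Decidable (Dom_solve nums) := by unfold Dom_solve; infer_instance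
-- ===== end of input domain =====

-- B replaces A's single running-minimum loop by a divide-and-conquer scan (recursive half-split
-- prefix-minimum tables merged by clamping) followed by a shift-and-zero; equivalence is about the
-- RETURN value — in Python both A and B also mutate the argument list in place the same way.


-- ===== PORT A =====
-- prev_smallest = nums[0]; for i, num in enumerate(nums): if i != 0: value = nums[i];
-- nums[i] = prev_smallest; prev_smallest = min(value, prev_smallest); nums[0] = 0; return nums
def solve (nums : List Int) : List Int :=
  let prev0 := PySem.List.pyGetD nums 0 0   -- nums[0]; Pre_solve excludes the empty list (IndexError)
  let st := (PySem.List.enumerate nums).foldl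
    (fun (st : List Int × Int) (iv : Int × Int) =>
      if iv.1 ≠ 0 then
        let value := PySem.List.pyGetD st.1 iv.1 0
        let ns := PySem.List.pySetD st.1 iv.1 st.2
        (ns, min value st.2)
      else st) (nums, prev0)
  PySem.List.pySetD st.1 0 0

-- ===== PORT B =====
-- def scan(seg): if len(seg)==1: return list(seg), seg[0]; mid = len(seg)//2;
-- lp, lm = scan(seg[:mid]); rp, rm = scan(seg[mid:]);
-- return lp + [m if m < lm else lm for m in rp], (lm if lm < rm else rm)
-- (Python's scan never reaches an empty seg from a nonempty input; the len=0 branch here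
--  only makes the recursion total — Python would recurse forever there, outside Pre_solve.)
def scanB (seg : List Int) : List Int × Int :=
  if seg.length = 1 then (seg, seg.headD 0)
  else if _h0 : seg.length = 0 then ([], 0)
  else
    let mid := seg.length / 2
    let l := scanB (seg.take mid)
    let r := scanB (seg.drop mid)
    (l.1 ++ r.1.map (fun m => if m < l.2 then m else l.2), if l.2 < r.2 then l.2 else r.2)
termination_by seg.length
decreasing_by
  · simp only [List.length_take]; omega
  · simp only [List.length_drop]; omega

-- pm, _ = scan(nums); nums[1:] = pm[:-1]; nums[0] = 0; return nums
def solve_alt (nums : List Int) : List Int :=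
  let pm := (scanB nums).1
  PySem.List.pySetD
    (PySem.List.slice nums none (some 1) ++ PySem.List.slice pm none (some (-1))) 0 0

-- ===== PRECONDITION & SPEC =====
-- A raises IndexError on the empty list (nums[0]); that input is excluded.
def Pre_solve (nums : List Int) : Prop := nums ≠ []
instance (nums : List Int) : Decidable (Pre_solve nums) := by unfold Pre_solve; infer_instance
def pvWitness_solve : List Int := [3, 1, 2]
def Spec_solve (nums : List Int) (out : List Int) : Prop := out = solve_alt nums
instance (nums : List Int) (out : List Int) : Decidable (Spec_solve nums out) := by unfold Spec_solve; infer_instance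

-- ===== CLAIM (what is proved, stated in full; the proofs are below) =====
def Claim_equal_solve : Prop := ∀ (nums : List Int), Dom_solve nums → Pre_solve nums → Spec_solve nums (solve nums)

-- ===== LEMMAS AND PROOFS =====

-- prefix minima of the elements STRICTLY BEFORE each position, seeded with p
def prefMins (p : Int) : List Int → List Int
  | [] => []
  | x :: xs => p :: prefMins (min x p) xs

-- running minima INCLUDING each position, seeded with p
def runMins (p : Int) : List Int → List Int
  | [] => []
  | x :: xs => min x p :: runMins (min x p) xs

-- running minima INCLUDING each position, no seed (what scanB's table is)
def incMins : List Int → List Int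
  | [] => []
  | x :: xs => x :: (incMins xs).map (fun m => min m x)

-- minimum of a nonempty list
def minL : List Int → Int
  | [] => 0
  | [x] => x
  | x :: y :: r => min x (minL (y :: r))

theorem dropLast_cons_runMins (p : Int) (xs : List Int) :
    (p :: runMins p xs).dropLast = prefMins p xs := by
  induction xs generalizing p with
  | nil => simp [runMins, prefMins]
  | cons x r ih => simp [runMins, prefMins, ih]

theorem map_min_incMins (a : Int) (t : List Int) :
    (incMins t).map (fun m => min m a) = runMins a t := by
  induction t generalizing a with
  | nil => simp [incMins, runMins]
  | cons x r ih =>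
    simp only [incMins, runMins, List.map_cons, List.map_map]
    congr 1
    rw [← ih (min x a)]
    apply List.map_congr_left
    intro m _
    simp only [Function.comp_apply]
    omega

theorem minL_cons_cons (x y : Int) (r : List Int) :
    minL (x :: y :: r) = min x (minL (y :: r)) := rfl

theorem minL_append (L R : List Int) (hL : L ≠ []) (hR : R ≠ []) :
    minL (L ++ R) = min (minL L) (minL R) := by
  induction L with
  | nil => exact absurd rfl hL
  | cons x l ih =>
    cases l with
    | nil =>
      cases R with
      | nil => exact absurd rfl hR
      | cons y r => simp [minL_cons_cons, minL]
    | cons y r =>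
      have := ih (by simp)
      simp only [List.cons_append] at this ⊢
      rw [minL_cons_cons]
      rw [this, minL_cons_cons, min_assoc]

theorem incMins_append (L R : List Int) (hL : L ≠ []) :
    incMins (L ++ R) = incMins L ++ (incMins R).map (fun m => min m (minL L)) := by
  induction L with
  | nil => exact absurd rfl hL
  | cons x l ih =>
    cases l with
    | nil => simp [incMins, minL]
    | cons y r =>
      have h := ih (by simp)
      simp only [List.cons_append, incMins] at h ⊢
      rw [h]
      simp only [List.map_cons, List.map_append, List.map_map, minL_cons_cons]
      congr 1
      congr 1
      congr 1
      apply List.map_congr_left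
      intro m _
      simp only [Function.comp_apply]
      omega

theorem scanB_spec : ∀ (n : Nat) (seg : List Int), seg.length ≤ n → seg ≠ [] →
    scanB seg = (incMins seg, minL seg) := by
  intro n
  induction n with
  | zero => intro seg h hne; cases seg with
    | nil => exact absurd rfl hne
    | cons x r => simp at h
  | succ n ih =>
    intro seg hlen hne
    rw [scanB]
    by_cases h1 : seg.length = 1
    · rw [if_pos h1]
      cases seg with
      | nil => exact absurd rfl hne
      | cons x r =>
        cases r with
        | nil => simp [incMins, minL]
        | cons y s => simp at h1
    · rw [if_neg h1]
      have h0 : ¬ seg.length = 0 := by simp [List.length_eq_zero_iff]; exact hne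
      rw [dif_neg h0]
      have hge : 2 ≤ seg.length := by omega
      have hmid1 : 1 ≤ seg.length / 2 := by omega
      have hmidlt : seg.length / 2 < seg.length := by omega
      have htake : (seg.take (seg.length / 2)).length = seg.length / 2 := by
        simp [List.length_take]; omega
      have hdrop : (seg.drop (seg.length / 2)).length = seg.length - seg.length / 2 := by
        simp [List.length_drop]
      have htne : seg.take (seg.length / 2) ≠ [] := by
        rw [← List.length_pos_iff, htake]; omega
      have hdne : seg.drop (seg.length / 2) ≠ [] := by
        rw [← List.length_pos_iff, hdrop]; omega
      have hsplit : seg.take (seg.length / 2) ++ seg.drop (seg.length / 2) = seg :=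
        List.take_append_drop _ _
      show ((scanB (seg.take (seg.length / 2))).1 ++
          (scanB (seg.drop (seg.length / 2))).1.map
            (fun m => if m < (scanB (seg.take (seg.length / 2))).2 then m
              else (scanB (seg.take (seg.length / 2))).2),
          if (scanB (seg.take (seg.length / 2))).2 < (scanB (seg.drop (seg.length / 2))).2
            then (scanB (seg.take (seg.length / 2))).2
            else (scanB (seg.drop (seg.length / 2))).2) = (incMins seg, minL seg)
      rw [ih _ (by omega) htne, ih _ (by rw [hdrop]; omega) hdne]
      rw [show (fun m => if m < (minL (seg.take (seg.length / 2))) then m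
            else minL (seg.take (seg.length / 2)))
          = (fun m => min m (minL (seg.take (seg.length / 2)))) from
          funext (fun m => by split <;> omega)]
      rw [← incMins_append _ _ htne, hsplit]
      rw [show (if minL (seg.take (seg.length / 2)) < minL (seg.drop (seg.length / 2))
            then minL (seg.take (seg.length / 2)) else minL (seg.drop (seg.length / 2)))
          = min (minL (seg.take (seg.length / 2))) (minL (seg.drop (seg.length / 2)))
          from by split <;> omega]
      rw [← minL_append _ _ htne hdne, hsplit]

-- A's loop invariant: folding the remaining enumerated tail over (done ++ rest, p)
theorem loopA (rest : List Int) : ∀ (done : List Int) {p : Int}, done ≠ [] →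
    (PySem.List.enumerate rest (done.length : Int)).foldl
      (fun (st : List Int × Int) (iv : Int × Int) =>
        if iv.1 ≠ 0 then
          (PySem.List.pySetD st.1 iv.1 st.2, min (PySem.List.pyGetD st.1 iv.1 0) st.2)
        else st) (done ++ rest, p)
      = (done ++ prefMins p rest, (runMins p rest).getLastD p) := by
  induction rest with
  | nil => intro done p _; simp [PySem.List.enumerate_nil, prefMins, runMins]
  | cons x r ih =>
    intro done p hd
    rw [PySem.List.enumerate_cons]
    have hne : (done.length : Int) ≠ 0 := by
      simp [List.length_eq_zero_iff]; exact hd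
    have hget : PySem.List.pyGetD (done ++ x :: r) (done.length : Int) 0 = x := by
      rw [show ((done.length : Int)) = ((done.length : Nat) : Int) from rfl,
        PySem.List.pyGetD_natCast]
      simp
    have hset : PySem.List.pySetD (done ++ x :: r) (done.length : Int) p = done ++ p :: r := by
      rw [show ((done.length : Int)) = ((done.length : Nat) : Int) from rfl,
        PySem.List.pySetD_natCast]
      simp
    simp only [List.foldl_cons, if_pos hne, hget, hset]
    have h1 : ((done.length : Int) + 1) = (((done ++ [p]).length : Nat) : Int) := by
      simp
    rw [h1]
    have := ih (p := min x p) (done ++ [p]) (by simp)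
    simp only [List.append_assoc, List.singleton_append] at this
    rw [this]
    simp [prefMins, runMins]
    cases r <;> simp [runMins, ← List.getLastD_eq_getLast?, List.getLastD_cons]

theorem solve_eq (a : Int) (t : List Int) : solve (a :: t) = 0 :: prefMins a t := by
  have h := loopA (p := a) t [a] (by simp)
  simp only [List.length_cons, List.length_nil, Nat.cast_one, zero_add,
    List.singleton_append] at h
  simp only [solve, PySem.List.enumerate_cons, PySem.List.pyGetD_zero_cons, List.foldl_cons,
    ne_eq, not_true_eq_false, if_false, zero_add, h]
  simp [PySem.List.pySetD_of_nonneg]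

theorem incMins_cons_eq (a : Int) (t : List Int) : incMins (a :: t) = a :: runMins a t := by
  simp [incMins, map_min_incMins]

theorem solve_alt_eq (a : Int) (t : List Int) : solve_alt (a :: t) = 0 :: prefMins a t := by
  simp only [solve_alt, scanB_spec (a :: t).length (a :: t) le_rfl (by simp),
    incMins_cons_eq, PySem.List.slice_to_neg_one, zero_le_one, PySem.List.slice_to,
    Int.toNat_one, dropLast_cons_runMins]
  simp [PySem.List.pySetD_of_nonneg]

-- ===== VERDICT (by name: the statement is the Claim_ definition above) =====
theorem solve_spec : Claim_equal_solve := by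
  intro nums _ hpre
  unfold Spec_solve
  cases nums with
  | nil => exact absurd rfl hpre
  | cons a t => rw [solve_eq, solve_alt_eq]
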